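-- pv_equiv track=rewrite | github.com/ComaVN/adventofcode-2024 | day07/part1.py | try_equation
-- ===== SOURCE A (Python) =====
-- def try_equation(test_value, numbers):
--     bin_ops = {
--         "+": lambda a, b: a + b,
--         "*": lambda a, b: a * b,
--     }
--
--     def try_part(aggr, remaining_numbers):
--         if len(remaining_numbers) == 0:
--             return aggr == test_value
--         next_number = remaining_numbers[0]
--         for op in bin_ops.values():
--             next_aggr = op(aggr, next_number)
--             if next_aggr > test_value:
--                 continue
--             if try_part(next_aggr, remaining_numbers[1:]):
--                 return True
--         return False
--
--     return test_value if try_part(numbers.pop(0), numbers) else 0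
-- ===== SOURCE B (Python) =====
-- def try_equation(test_value, numbers):
--     # Set-based DP over the distinct reachable aggregate values (dedup of states)
--     # rather than a depth-first search over operator sequences.
--     states = {numbers.pop(0)}
--     for n in numbers:
--         states = {r for s in states for r in (s + n, s * n) if r <= test_value}
--     return test_value if test_value in states else 0
-- ===== Notes on version B (the rewrite author's own statement) =====
-- stated objective: alternative
-- what changed: Replaces the recursive depth-first search over all +/* operator sequences by a one-pass set-based DP that keeps the distinct reachable aggregate values (with the same <= test_value pruning); trades recursion depth for state-set size.
import Mathlib
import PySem

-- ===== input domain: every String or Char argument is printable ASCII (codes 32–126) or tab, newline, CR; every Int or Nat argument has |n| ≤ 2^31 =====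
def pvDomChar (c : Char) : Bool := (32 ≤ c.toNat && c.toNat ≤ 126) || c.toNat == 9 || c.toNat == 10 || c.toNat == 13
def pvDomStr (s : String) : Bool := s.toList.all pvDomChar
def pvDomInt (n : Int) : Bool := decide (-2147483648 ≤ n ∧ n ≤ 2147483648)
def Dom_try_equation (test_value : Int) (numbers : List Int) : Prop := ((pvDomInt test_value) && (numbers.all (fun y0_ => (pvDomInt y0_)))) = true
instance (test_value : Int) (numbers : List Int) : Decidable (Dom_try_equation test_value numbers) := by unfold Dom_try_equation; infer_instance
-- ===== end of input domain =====

-- B replaces A's recursive depth-first search over operator sequences by a set-based DP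
-- over the distinct reachable aggregates (objective: alternative). Both A and B pop
-- numbers[0] in place in Python; the equivalence proved here is about the return value.

-- ===== PORT A =====
-- try_part: loop over bin_ops ("+" then "*"), 'continue' on overshoot, early return True
def tryPartA (tv : Int) (aggr : Int) : List Int → Bool
  | [] => aggr == tv
  | n :: rest =>
      (if aggr + n > tv then false else tryPartA tv (aggr + n) rest) ||
      (if aggr * n > tv then false else tryPartA tv (aggr * n) rest)

def try_equation (test_value : Int) (numbers : List Int) : Int :=
  match numbers with
  | [] => 0  -- Python raises IndexError on numbers.pop(0); excluded by Pre_
  | first :: rest => if tryPartA test_value first rest then test_value else 0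

-- ===== PORT B =====
-- one step of the set comprehension {r for s in states for r in (s+n, s*n) if r <= tv}
def stepAlt (tv : Int) (states : PySem.Set Int) (n : Int) : PySem.Set Int :=
  states.foldl (fun acc s =>
    let acc1 := if s + n ≤ tv then PySem.Set.add acc (s + n) else acc
    if s * n ≤ tv then PySem.Set.add acc1 (s * n) else acc1) PySem.Set.empty

def try_equation_alt (test_value : Int) (numbers : List Int) : Int :=
  match numbers with
  | [] => 0  -- Python raises IndexError on numbers.pop(0); excluded by Pre_
  | first :: rest =>
      let states := rest.foldl (stepAlt test_value) (PySem.Set.ofList [first])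
      if PySem.Set.contains states test_value then test_value else 0

-- ===== PRECONDITION & SPEC =====
-- numbers.pop(0) raises IndexError on the empty list (in both A and B).
def Pre_try_equation (test_value : Int) (numbers : List Int) : Prop := numbers ≠ []
instance (test_value : Int) (numbers : List Int) : Decidable (Pre_try_equation test_value numbers) := by unfold Pre_try_equation; infer_instance
def pvWitness_try_equation : Int × List Int := (6, [2, 3])

def Spec_try_equation (test_value : Int) (numbers : List Int) (out : Int) : Prop := out = try_equation_alt test_value numbers
instance (test_value : Int) (numbers : List Int) (out : Int) : Decidable (Spec_try_equation test_value numbers out) := by unfold Spec_try_equation; infer_instance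

-- ===== CLAIM (what is proved, stated in full; the proofs are below) =====
def Claim_equal_try_equation : Prop := ∀ (test_value : Int) (numbers : List Int), Dom_try_equation test_value numbers → Pre_try_equation test_value numbers → Spec_try_equation test_value numbers (try_equation test_value numbers)

-- ===== LEMMAS AND PROOFS =====

-- x ∈ (conditional add) unfolded
theorem mem_addIf (a : List Int) (c : Prop) [Decidable c] (y x : Int) :
    x ∈ (if c then PySem.Set.add a y else a) ↔ x ∈ a ∨ (c ∧ x = y) := by
  split_ifs with h <;> simp [PySem.Set.mem_add, h]

-- helper: membership in the inner foldl with any accumulator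
theorem mem_stepAlt_aux (tv n x : Int) (L acc : List Int) :
    x ∈ L.foldl (fun acc s =>
      let acc1 := if s + n ≤ tv then PySem.Set.add acc (s + n) else acc
      if s * n ≤ tv then PySem.Set.add acc1 (s * n) else acc1) acc ↔
    x ∈ acc ∨ ∃ s ∈ L, ((x = s + n ∨ x = s * n) ∧ x ≤ tv) := by
  induction L generalizing acc with
  | nil => simp
  | cons h t ih =>
      simp only [List.foldl_cons, ih, mem_addIf, List.mem_cons]
      constructor
      · rintro (((hm | ⟨h1, rfl⟩) | ⟨h2, rfl⟩) | ⟨s, hs, hx⟩)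
        · exact Or.inl hm
        · exact Or.inr ⟨h, Or.inl rfl, Or.inl rfl, h1⟩
        · exact Or.inr ⟨h, Or.inl rfl, Or.inr rfl, h2⟩
        · exact Or.inr ⟨s, Or.inr hs, hx⟩
      · rintro (hm | ⟨s, rfl | hs, (rfl | rfl), hle⟩)
        · exact Or.inl (Or.inl (Or.inl hm))
        · exact Or.inl (Or.inl (Or.inr ⟨hle, rfl⟩))
        · exact Or.inl (Or.inr ⟨hle, rfl⟩)
        · exact Or.inr ⟨s, hs, Or.inl rfl, hle⟩
        · exact Or.inr ⟨s, hs, Or.inr rfl, hle⟩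

-- membership in one DP step
theorem mem_stepAlt (tv n x : Int) (S : PySem.Set Int) :
    x ∈ stepAlt tv S n ↔ ∃ s ∈ S, ((x = s + n ∨ x = s * n) ∧ x ≤ tv) := by
  simpa [PySem.Set.empty] using mem_stepAlt_aux tv n x S []

-- the DP set reaches tv iff some state in S makes try_part succeed
theorem fold_reaches (tv : Int) (l : List Int) (S : PySem.Set Int) :
    tv ∈ l.foldl (stepAlt tv) S ↔ ∃ s ∈ S, tryPartA tv s l = true := by
  induction l generalizing S with
  | nil => simp [tryPartA]
  | cons n rest ih =>
      simp only [List.foldl_cons, ih]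
      constructor
      · rintro ⟨s', hs', hT⟩
        rw [mem_stepAlt] at hs'
        obtain ⟨s, hs, hx, hle⟩ := hs'
        refine ⟨s, hs, ?_⟩
        simp only [tryPartA, Bool.or_eq_true]
        rcases hx with rfl | rfl
        · left; rw [if_neg (by omega)]; exact hT
        · right; rw [if_neg (by omega)]; exact hT
      · rintro ⟨s, hs, hT⟩
        simp only [tryPartA, Bool.or_eq_true] at hT
        rcases hT with hT | hT
        · by_cases h1 : s + n > tv
          · rw [if_pos h1] at hT; exact absurd hT (by simp)
          · rw [if_neg h1] at hT
            exact ⟨s + n, (mem_stepAlt tv n (s + n) S).mpr ⟨s, hs, Or.inl rfl, by omega⟩, hT⟩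
        · by_cases h2 : s * n > tv
          · rw [if_pos h2] at hT; exact absurd hT (by simp)
          · rw [if_neg h2] at hT
            exact ⟨s * n, (mem_stepAlt tv n (s * n) S).mpr ⟨s, hs, Or.inr rfl, by omega⟩, hT⟩

-- ===== VERDICT (by name: the statement is the Claim_ definition above) =====
theorem try_equation_spec : Claim_equal_try_equation := by
  intro tv numbers _ hpre
  unfold Spec_try_equation
  cases numbers with
  | nil => exact absurd rfl hpre
  | cons first rest =>
      simp only [try_equation, try_equation_alt]
      have h : (PySem.Set.contains (rest.foldl (stepAlt tv) (PySem.Set.ofList [first])) tv = true)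
          ↔ tryPartA tv first rest = true := by
        rw [PySem.Set.contains_iff, fold_reaches]
        simp [PySem.Set.mem_ofList]
      rw [Bool.eq_iff_iff.mpr h]
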